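-- pv_equiv track=rewrite | github.com/alexbarajas/leetcode | all_leetcode/2150. Find All Lonely Numbers in the Array.py | findLonely
-- ===== SOURCE A (Python) =====
-- from typing import List
--
-- def findLonely(nums: List[int]) -> List[int]:
--     # 1. make a counts hashmap, and make an answer array
--     counts = {}
--     answer = []
--
--     # 2. get the count for each number into the counts hashmap
--     for number in nums:
--         counts[number] = counts.get(number, 0) + 1
--
--     # 3. go through the counts hashmap, if the count is over 1, continue, if the neighbors are not in the hashmap, add it to the answer array
--     for number, count in counts.items():
--         if count == 1 and number - 1 not in counts and number + 1 not in counts: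
--             answer.append(number)
--
--     # 4. return the answer array
--     return answer
-- ===== SOURCE B (Python) =====
-- def findLonely(nums):
--     # Sort a copy; one linear scan over the sorted list marks s[i] lonely when
--     # its sorted neighbors are not within 1 (this captures count==1 and no x+-1);
--     # then filter the original list to keep A's first-occurrence order.
--     s = sorted(nums)
--     n = len(s)
--     lonely = set()
--     for i in range(n):
--         if (i == 0 or s[i - 1] < s[i] - 1) and (i == n - 1 or s[i + 1] > s[i] + 1):
--             lonely.add(s[i])
--     return [x for x in nums if x in lonely]
-- ===== Notes on version B (the rewrite author's own statement) =====
-- stated objective: alternative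
-- what changed: Replaces A's counts-hashmap build plus dict-items scan with sort-then-linear-scan: in the sorted copy an element is lonely iff its sorted neighbors are not within 1, those values go into a set, and the original list is filtered by set membership to keep A's first-occurrence order.
import Mathlib
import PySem

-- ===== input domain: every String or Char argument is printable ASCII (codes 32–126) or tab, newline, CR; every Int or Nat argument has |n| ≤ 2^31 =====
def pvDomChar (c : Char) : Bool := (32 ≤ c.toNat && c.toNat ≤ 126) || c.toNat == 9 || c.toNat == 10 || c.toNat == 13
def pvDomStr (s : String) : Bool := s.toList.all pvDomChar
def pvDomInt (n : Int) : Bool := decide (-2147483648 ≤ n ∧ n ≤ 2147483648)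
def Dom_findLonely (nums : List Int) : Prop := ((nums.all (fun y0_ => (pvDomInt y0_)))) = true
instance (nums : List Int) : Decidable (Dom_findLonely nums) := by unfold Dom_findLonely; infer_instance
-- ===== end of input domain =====

-- B replaces A's counts-hashmap build + dict-items scan by a sort-then-linear-scan:
-- in sorted order an element is lonely iff its sorted neighbors are not within 1;
-- the original list is then filtered to keep A's order. Objective: alternative.


-- ===== PORT A =====
def findLonely (nums : List Int) : List Int :=
  let counts : PySem.Dict Int Int :=
    nums.foldl (fun d number => d.insert number (d.getD number 0 + 1)) PySem.Dict.empty
  counts.items.foldl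
    (fun answer p =>
      if p.2 == 1 && !counts.contains (p.1 - 1) && !counts.contains (p.1 + 1)
      then answer ++ [p.1] else answer) []

-- ===== PORT B =====
def findLonely_alt (nums : List Int) : List Int :=
  let s := PySem.List.sorted nums (fun x => x) false
  let n : Int := s.length
  let lonely : PySem.Set Int :=
    (PySem.List.pyRange 0 n 1).foldl
      (fun ac i =>
        if ((i == 0) || (PySem.List.pyGetD s (i - 1) 0 < PySem.List.pyGetD s i 0 - 1))
           && ((i == n - 1) || (PySem.List.pyGetD s i 0 + 1 < PySem.List.pyGetD s (i + 1) 0))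
        then PySem.Set.add ac (PySem.List.pyGetD s i 0) else ac)
      PySem.Set.empty
  nums.filter (fun x => PySem.Set.contains lonely x)

-- ===== PRECONDITION & SPEC =====
def Spec_findLonely (nums : List Int) (out : List Int) : Prop := out = findLonely_alt nums
instance (nums : List Int) (out : List Int) : Decidable (Spec_findLonely nums out) := by unfold Spec_findLonely; infer_instance

-- ===== CLAIM (what is proved, stated in full; the proofs are below) =====
def Claim_equal_findLonely : Prop := ∀ (nums : List Int), Dom_findLonely nums → Spec_findLonely nums (findLonely nums)

-- ===== LEMMAS AND PROOFS =====

-- Filtering the first-occurrence dedup equals filtering the original list when every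
-- element passing the predicate occurs at most once.
theorem filter_ofList_eq (P : Int → Bool) :
    ∀ (xs : List Int), (∀ y ∈ xs, P y = true → List.count y xs ≤ 1) →
      (PySem.Set.ofList xs).filter P = xs.filter P := by
  intro xs
  induction xs with
  | nil => intro _; rfl
  | cons x xs ih =>
    intro h
    rw [PySem.Set.ofList_cons]
    by_cases hx : P x = true
    · have hcnt : List.count x (x :: xs) ≤ 1 := h x (by simp) hx
      have hxnot : x ∉ xs := by
        intro hmem
        have : 2 ≤ List.count x (x :: xs) := by
          have := List.one_le_count_iff.mpr hmem
          simp [List.count_cons_self]; omega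
        omega
      have hdis : (PySem.Set.ofList xs).discard x = PySem.Set.ofList xs := by
        unfold PySem.Set.discard
        apply List.filter_eq_self.mpr
        intro a ha
        have : a ∈ xs := (PySem.Set.mem_ofList xs a).mp ha
        simp
        intro hax; exact hxnot (hax ▸ this)
      rw [hdis]
      simp only [List.filter_cons, hx]
      rw [ih]
      intro y hy hPy
      have := h y (by simp [hy]) hPy
      have hle : List.count y xs ≤ List.count y (x :: xs) :=
        (List.sublist_cons_self x xs).count_le y
      omega
    · have hPx : P x = false := by simpa using hx
      simp only [List.filter_cons, hPx]
      have hdisf : ((PySem.Set.ofList xs).discard x).filter P = (PySem.Set.ofList xs).filter P := by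
        unfold PySem.Set.discard
        rw [List.filter_filter]
        apply List.filter_congr
        intro a _
        by_cases hax : a = x
        · subst hax; simp [hPx]
        · simp [hax]
      simp only [Bool.false_eq_true, if_false] at *
      rw [hdisf, ih]
      intro y hy hPy
      have := h y (by simp [hy]) hPy
      have hle : List.count y xs ≤ List.count y (x :: xs) :=
        (List.sublist_cons_self x xs).count_le y
      omega

-- A's port computes the filter of the original list by the direct lonely predicate.
theorem findLonely_eq_filter (nums : List Int) :
    findLonely nums = nums.filter (fun x =>
      ((List.count x nums : Int) == 1) && !nums.contains (x - 1) && !nums.contains (x + 1)) := by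
  unfold findLonely
  rw [PySem.Dict.foldl_insert_getD_add_one_eq_counter]
  simp only [PySem.Dict.items_counter, PySem.List.foldl_append_if, List.nil_append,
    List.filter_map, List.map_map, PySem.Dict.contains_counter,
    Function.comp_def, List.map_id_fun']
  have hP : (fun k : Int =>
      ((k, (List.count k nums : Int)).2 == 1 && !nums.contains ((k, (List.count k nums : Int)).1 - 1)
        && !nums.contains ((k, (List.count k nums : Int)).1 + 1)))
      = (fun x : Int => ((List.count x nums : Int) == 1) && !nums.contains (x - 1) && !nums.contains (x + 1)) := by
    funext k
    rfl
  rw [hP]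
  apply filter_ofList_eq
  intro y _ hPy
  simp only [Bool.and_eq_true, beq_iff_eq] at hPy
  omega

-- The sorted-scan predicate, as a Prop over the Nat index.
def lonelyAt (S : List Int) (j : Nat) : Prop :=
  (j = 0 ∨ S.getD (j - 1) 0 < S.getD j 0 - 1) ∧
  (j = S.length - 1 ∨ S.getD j 0 + 1 < S.getD (j + 1) 0)

-- Bool scan condition at an in-range Nat index, as the Prop lonelyAt.
theorem cond_iff (S : List Int) (j : Nat) (hj : j < S.length) :
    ((((j : Int) == 0) || decide (PySem.List.pyGetD S ((j : Int) - 1) 0 < PySem.List.pyGetD S (j : Int) 0 - 1))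
     && (((j : Int) == (S.length : Int) - 1) || decide (PySem.List.pyGetD S (j : Int) 0 + 1 < PySem.List.pyGetD S ((j : Int) + 1) 0))) = true
    ↔ lonelyAt S j := by
  unfold lonelyAt
  constructor
  · intro h
    simp only [Bool.and_eq_true, Bool.or_eq_true, beq_iff_eq, decide_eq_true_eq] at h
    obtain ⟨ha, hb⟩ := h
    constructor
    · rcases ha with h | h
      · left; omega
      · by_cases h0 : j = 0
        · left; exact h0
        · right
          rw [show ((j : Nat) : Int) - 1 = ((j - 1 : Nat) : Int) by omega,
              PySem.List.pyGetD_natCast, PySem.List.pyGetD_natCast] at h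
          exact h
    · rcases hb with h | h
      · left; omega
      · right
        rw [show ((j : Nat) : Int) + 1 = ((j + 1 : Nat) : Int) by omega,
            PySem.List.pyGetD_natCast, PySem.List.pyGetD_natCast] at h
        exact h
  · rintro ⟨ha, hb⟩
    simp only [Bool.and_eq_true, Bool.or_eq_true, beq_iff_eq, decide_eq_true_eq]
    constructor
    · rcases ha with h | h
      · left; omega
      · by_cases h0 : j = 0
        · left; omega
        · right
          rw [show ((j : Nat) : Int) - 1 = ((j - 1 : Nat) : Int) by omega,
              PySem.List.pyGetD_natCast, PySem.List.pyGetD_natCast]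
          exact h
    · rcases hb with h | h
      · left; omega
      · right
        rw [show ((j : Nat) : Int) + 1 = ((j + 1 : Nat) : Int) by omega,
            PySem.List.pyGetD_natCast, PySem.List.pyGetD_natCast]
        exact h


-- Membership in B's fold-built set: the values at indices passing the scan condition.
theorem mem_scan_fold (S : List Int) (y : Int) :
    (y ∈ (PySem.List.pyRange 0 (S.length : Int) 1).foldl
      (fun ac i =>
        if ((i == 0) || (PySem.List.pyGetD S (i - 1) 0 < PySem.List.pyGetD S i 0 - 1))
           && ((i == (S.length : Int) - 1) || (PySem.List.pyGetD S i 0 + 1 < PySem.List.pyGetD S (i + 1) 0))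
        then PySem.Set.add ac (PySem.List.pyGetD S i 0) else ac)
      PySem.Set.empty) ↔
    ∃ j : Nat, j < S.length ∧ S.getD j 0 = y ∧ lonelyAt S j := by
  rw [PySem.List.foldl_if_eq_foldl_filter]
  rw [PySem.Set.mem_foldl_add]
  simp only [PySem.Set.empty, List.not_mem_nil, false_or, List.mem_filter,
    PySem.List.mem_pyRange_one]
  constructor
  · rintro ⟨i, ⟨⟨hi0, hin⟩, hc⟩, hy⟩
    refine ⟨i.toNat, by omega, ?_, ?_⟩
    · rw [show i = ((i.toNat : Nat) : Int) by omega] at hy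
      rw [PySem.List.pyGetD_natCast] at hy
      exact hy.symm
    · rw [show i = ((i.toNat : Nat) : Int) by omega] at hc
      exact (cond_iff S i.toNat (by omega)).mp hc
  · rintro ⟨j, hj, hy, hl⟩
    refine ⟨(j : Int), ⟨⟨by omega, by omega⟩, (cond_iff S j hj).mpr hl⟩, ?_⟩
    rw [PySem.List.pyGetD_natCast]
    exact hy.symm

-- On a ≤-sorted list, the scan condition at the index of y characterizes
-- "count 1 and no integer neighbor present".
theorem lonelyAt_char (S : List Int) (hpw : S.Pairwise (· ≤ ·)) (y : Int) :
    (∃ j : Nat, j < S.length ∧ S.getD j 0 = y ∧ lonelyAt S j) ↔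
    (List.count y S = 1 ∧ (y - 1) ∉ S ∧ (y + 1) ∉ S) := by
  have hmono : ∀ (p q : Nat) (hq : q < S.length) (hpq : p ≤ q), S[p]'(Nat.lt_of_le_of_lt hpq hq) ≤ S[q] := by
    intro p q hq hpq
    rcases Nat.lt_or_eq_of_le hpq with h | h
    · exact List.pairwise_iff_getElem.mp hpw p q (by omega) hq h
    · subst h; exact le_refl _
  constructor
  · rintro ⟨j, hj, hy, ⟨hL, hR⟩⟩
    rw [List.getD_eq_getElem S 0 hj] at hy
    have hlt : ∀ (k : Nat) (hk : k < j), S[k]'(by omega) < y - 1 := by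
      intro k hk
      have hj0 : j ≠ 0 := by omega
      rcases hL with h | h
      · exact absurd h hj0
      · rw [List.getD_eq_getElem S 0 (by omega : j - 1 < S.length),
            List.getD_eq_getElem S 0 hj, hy] at h
        have := hmono k (j-1) (by omega) (by omega)
        omega
    have hgt : ∀ (k : Nat) (hk : k < S.length), j < k → y + 1 < S[k] := by
      intro k hk hjk
      have hj1 : j ≠ S.length - 1 := by omega
      rcases hR with h | h
      · exact absurd h hj1
      · rw [List.getD_eq_getElem S 0 (by omega : j + 1 < S.length),
            List.getD_eq_getElem S 0 hj, hy] at h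
        have := hmono (j+1) k hk (by omega)
        omega
    refine ⟨?_, ?_, ?_⟩
    · have h1 : List.count y (S.take j) = 0 := by
        rw [List.count_eq_zero]
        intro hmem
        obtain ⟨i, hi, hiy⟩ := List.mem_take_iff_getElem.mp hmem
        have := hlt i (by omega)
        rw [hiy] at this
        omega
      have h2 : List.count y (S.drop (j+1)) = 0 := by
        rw [List.count_eq_zero]
        intro hmem
        obtain ⟨i, hi, hiy⟩ := List.mem_drop_iff_getElem.mp hmem
        have := hgt (j+1+i) (by omega) (by omega)
        rw [hiy] at this
        omega
      conv_lhs => rw [← List.take_append_drop j S]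
      rw [List.count_append, List.drop_eq_getElem_cons hj, List.count_cons]
      simp [h1, h2, hy]
    · intro hmem
      obtain ⟨i, hi, hiy⟩ := List.mem_iff_getElem.mp hmem
      rcases Nat.lt_trichotomy i j with h | h | h
      · have := hlt i h; rw [hiy] at this; omega
      · subst h; rw [hiy] at hy; omega
      · have := hgt i hi h; rw [hiy] at this; omega
    · intro hmem
      obtain ⟨i, hi, hiy⟩ := List.mem_iff_getElem.mp hmem
      rcases Nat.lt_trichotomy i j with h | h | h
      · have := hlt i h; rw [hiy] at this; omega
      · subst h; rw [hiy] at hy; omega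
      · have := hgt i hi h; rw [hiy] at this; omega
  · rintro ⟨hc, hm1, hp1⟩
    have hmem : y ∈ S := List.count_pos_iff.mp (by omega)
    obtain ⟨j, hj, hy⟩ := List.mem_iff_getElem.mp hmem
    have hdistinct : ∀ (k : Nat) (hk : k < S.length), k ≠ j → S[k] ≠ y := by
      intro k hk hkj he
      have h2 : 2 ≤ List.count y S := by
        rcases Nat.lt_or_ge k j with h | h
        · conv at hc => lhs; rw [← List.take_append_drop k S]
          rw [List.count_append, List.drop_eq_getElem_cons hk, List.count_cons] at hc
          have hmem2 : y ∈ S.drop (k+1) := by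
            rw [List.mem_drop_iff_getElem]
            exact ⟨j - (k+1), by omega, by
              have hidx : k + 1 + (j - (k+1)) = j := by omega
              exact (getElem_congr rfl hidx (by omega)).trans hy⟩
          have := List.count_pos_iff.mpr hmem2
          simp [he] at hc
          omega
        · have h' : j < k := by omega
          conv at hc => lhs; rw [← List.take_append_drop j S]
          rw [List.count_append, List.drop_eq_getElem_cons hj, List.count_cons] at hc
          have hmem2 : y ∈ S.drop (j+1) := by
            rw [List.mem_drop_iff_getElem]
            exact ⟨k - (j+1), by omega, by
              have hidx : j + 1 + (k - (j+1)) = k := by omega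
              exact (getElem_congr rfl hidx (by omega)).trans he⟩
          have := List.count_pos_iff.mpr hmem2
          simp [hy] at hc
          omega
      omega
    refine ⟨j, hj, by rw [List.getD_eq_getElem S 0 hj]; exact hy, ?_, ?_⟩
    · by_cases h0 : j = 0
      · exact Or.inl h0
      · refine Or.inr ?_
        rw [List.getD_eq_getElem S 0 (by omega : j - 1 < S.length),
            List.getD_eq_getElem S 0 hj, hy]
        have hle : S[j-1]'(by omega) ≤ y := by
          have := hmono (j-1) j hj (by omega); omega
        have hne : S[j-1]'(by omega) ≠ y := hdistinct (j-1) (by omega) (by omega)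
        have hnm : S[j-1]'(by omega) ≠ y - 1 := by
          intro he; exact hm1 (he ▸ List.getElem_mem _)
        omega
    · by_cases h1 : j = S.length - 1
      · exact Or.inl h1
      · refine Or.inr ?_
        rw [List.getD_eq_getElem S 0 (by omega : j + 1 < S.length),
            List.getD_eq_getElem S 0 hj, hy]
        have hle : y ≤ S[j+1]'(by omega) := by have := hmono j (j+1) (by omega) (by omega); omega
        have hne : S[j+1]'(by omega) ≠ y := hdistinct (j+1) (by omega) (by omega)
        have hnp : S[j+1]'(by omega) ≠ y + 1 := by
          intro he; exact hp1 (he ▸ List.getElem_mem _)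
        omega


-- ===== VERDICT (by name: the statement is the Claim_ definition above) =====
theorem findLonely_spec : Claim_equal_findLonely := by
  intro nums _
  unfold Spec_findLonely
  rw [findLonely_eq_filter]
  unfold findLonely_alt
  dsimp only
  apply List.filter_congr
  intro x hx
  have hperm : (PySem.List.sorted nums (fun x => x) false).Perm nums :=
    PySem.List.sorted_perm nums (fun x => x) false
  have hpw : (PySem.List.sorted nums (fun x => x) false).Pairwise (· ≤ ·) :=
    PySem.List.sorted_pairwise nums (fun x => x)
  have hiff := (mem_scan_fold (PySem.List.sorted nums (fun x => x) false) x).trans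
    (lonelyAt_char (PySem.List.sorted nums (fun x => x) false) hpw x)
  have hiff2 : x ∈ (PySem.List.pyRange 0 ((PySem.List.sorted nums (fun x => x) false).length : Int) 1).foldl
      (fun ac i =>
        if ((i == 0) || (PySem.List.pyGetD (PySem.List.sorted nums (fun x => x) false) (i - 1) 0 < PySem.List.pyGetD (PySem.List.sorted nums (fun x => x) false) i 0 - 1))
           && ((i == ((PySem.List.sorted nums (fun x => x) false).length : Int) - 1) || (PySem.List.pyGetD (PySem.List.sorted nums (fun x => x) false) i 0 + 1 < PySem.List.pyGetD (PySem.List.sorted nums (fun x => x) false) (i + 1) 0))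
        then PySem.Set.add ac (PySem.List.pyGetD (PySem.List.sorted nums (fun x => x) false) i 0) else ac)
      PySem.Set.empty ↔
      (List.count x nums = 1 ∧ (x - 1) ∉ nums ∧ (x + 1) ∉ nums) := by
    rw [hiff, hperm.count_eq, hperm.mem_iff, hperm.mem_iff]
  rw [Bool.eq_iff_iff, PySem.Set.contains_iff, hiff2]
  simp
  tauto
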